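-- pv_equiv track=rewrite | github.com/cbeyer-code/AFA_Stream_Framework | framework.py | generate_feature_costs
-- ===== SOURCE A (Python) =====
-- def generate_feature_costs(feature_names: list, strategy: str = 'equal', base_cost: int = 1) -> dict:
--     """
--     Generates a dictionary of feature costs based on a given strategy.
--
--     Args:
--         feature_names (list): A list of the feature names.
--         strategy (str): One of 'equal', 'increasing', or 'decreasing'.
--         base_cost (int): The base cost unit.
--
--     Returns:
--         dict: A dictionary mapping feature names to their costs.
--     """
--     if strategy == 'equal':
--         return {name: base_cost for name in feature_names}
--     elif strategy == 'increasing':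
--         return {name: (i + 1) * base_cost for i, name in enumerate(feature_names)}
--     elif strategy == 'decreasing':
--         return {name: (len(feature_names) - i) * base_cost for i, name in enumerate(feature_names)}
--     else:
--         raise ValueError("Strategy must be one of 'equal', 'increasing', or 'decreasing'.")
-- ===== SOURCE B (Python) =====
-- def generate_feature_costs(feature_names: list, strategy: str = 'equal', base_cost: int = 1) -> dict:
--     # One linear scan with a running arithmetic-progression cost (start, step);
--     # no per-branch comprehension and no index arithmetic inside the loop.
--     if strategy == 'equal':
--         cost, step = base_cost, 0
--     elif strategy == 'increasing':
--         cost, step = base_cost, base_cost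
--     elif strategy == 'decreasing':
--         cost, step = len(feature_names) * base_cost, -base_cost
--     else:
--         raise ValueError("Strategy must be one of 'equal', 'increasing', or 'decreasing'.")
--     costs = {}
--     for name in feature_names:
--         costs[name] = cost
--         cost += step
--     return costs
-- ===== Notes on version B (the rewrite author's own statement) =====
-- stated objective: alternative
-- what changed: A builds a separate indexed dict comprehension per strategy; B picks only a (start, step) pair per strategy and fills the dict in one loop with a running arithmetic-progression accumulator, with no index arithmetic or comprehension.
import Mathlib
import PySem

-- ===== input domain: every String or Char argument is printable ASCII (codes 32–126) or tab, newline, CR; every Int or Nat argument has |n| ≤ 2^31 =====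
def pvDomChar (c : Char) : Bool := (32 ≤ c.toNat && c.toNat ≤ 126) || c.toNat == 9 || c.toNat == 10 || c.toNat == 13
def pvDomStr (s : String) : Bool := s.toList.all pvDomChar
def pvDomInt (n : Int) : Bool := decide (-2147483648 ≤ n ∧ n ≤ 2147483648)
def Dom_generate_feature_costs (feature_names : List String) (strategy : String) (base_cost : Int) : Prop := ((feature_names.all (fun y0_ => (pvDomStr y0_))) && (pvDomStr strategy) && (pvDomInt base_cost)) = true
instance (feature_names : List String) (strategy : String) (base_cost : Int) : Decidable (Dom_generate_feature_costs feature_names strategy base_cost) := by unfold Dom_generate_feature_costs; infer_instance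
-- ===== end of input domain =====

-- B replaces A's three indexed dict comprehensions by one pass with a running (start, step) arithmetic-progression cost accumulator; objective: alternative (same cost, different construction).


-- ===== PORT A =====
def generate_feature_costs (feature_names : List String) (strategy : String) (base_cost : Int) : List (String × Int) :=
  if strategy = "equal" then
    (feature_names.foldl (fun d name => d.insert name base_cost) PySem.Dict.empty).items
  else if strategy = "increasing" then
    ((PySem.List.enumerate feature_names).foldl
      (fun d p => d.insert p.2 ((p.1 + 1) * base_cost)) PySem.Dict.empty).items
  else if strategy = "decreasing" then
    ((PySem.List.enumerate feature_names).foldl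
      (fun d p => d.insert p.2 (((feature_names.length : Int) - p.1) * base_cost)) PySem.Dict.empty).items
  else []  -- Python raises ValueError here; excluded by Pre_

-- ===== PORT B =====
def generate_feature_costs_alt (feature_names : List String) (strategy : String) (base_cost : Int) : List (String × Int) :=
  let init? : Option (Int × Int) :=
    if strategy = "equal" then some (base_cost, 0)
    else if strategy = "increasing" then some (base_cost, base_cost)
    else if strategy = "decreasing" then some ((feature_names.length : Int) * base_cost, -base_cost)
    else none  -- Python raises ValueError here; excluded by Pre_
  match init? with
  | none => []
  | some (c0, step) =>
    ((feature_names.foldl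
        (fun (s : PySem.Dict String Int × Int) name => (s.1.insert name s.2, s.2 + step))
        (PySem.Dict.empty, c0)).1).items

-- ===== PRECONDITION & SPEC =====
-- Pre_ excludes exactly the strategies on which A (and B) raise ValueError.
def Pre_generate_feature_costs (feature_names : List String) (strategy : String) (base_cost : Int) : Prop :=
  strategy = "equal" ∨ strategy = "increasing" ∨ strategy = "decreasing"
instance (feature_names : List String) (strategy : String) (base_cost : Int) : Decidable (Pre_generate_feature_costs feature_names strategy base_cost) := by unfold Pre_generate_feature_costs; infer_instance

def pvWitness_generate_feature_costs : List String × String × Int := (["a", "b", "c"], "increasing", 2)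

def Spec_generate_feature_costs (feature_names : List String) (strategy : String) (base_cost : Int) (out : List (String × Int)) : Prop := out = generate_feature_costs_alt feature_names strategy base_cost
instance (feature_names : List String) (strategy : String) (base_cost : Int) (out : List (String × Int)) : Decidable (Spec_generate_feature_costs feature_names strategy base_cost out) := by unfold Spec_generate_feature_costs; infer_instance

-- ===== CLAIM (what is proved, stated in full; the proofs are below) =====
def Claim_equal_generate_feature_costs : Prop := ∀ (feature_names : List String) (strategy : String) (base_cost : Int), Dom_generate_feature_costs feature_names strategy base_cost → Pre_generate_feature_costs feature_names strategy base_cost → Spec_generate_feature_costs feature_names strategy base_cost (generate_feature_costs feature_names strategy base_cost)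

-- ===== LEMMAS AND PROOFS =====

-- B's running-accumulator fold equals an indexed fold where element i gets cost c0 + i*step.
theorem run_eq_enum (fs : List String) (dict : PySem.Dict String Int) (c0 step : Int) :
    (fs.foldl (fun (s : PySem.Dict String Int × Int) name => (s.1.insert name s.2, s.2 + step))
        (dict, c0)).1 =
      (PySem.List.enumerate fs).foldl (fun d p => d.insert p.2 (c0 + p.1 * step)) dict := by
  induction fs generalizing dict c0 with
  | nil => rfl
  | cons x xs ih =>
    simp only [List.foldl_cons, PySem.List.enumerate_cons, ih]
    have h : PySem.List.enumerate xs 1 = (PySem.List.enumerate xs 0).map (fun p => (p.1 + 1, p.2)) := by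
      clear ih
      have gen : ∀ (l : List String) (s : Int),
          PySem.List.enumerate l (s + 1) = (PySem.List.enumerate l s).map (fun p => (p.1 + 1, p.2)) := by
        intro l
        induction l with
        | nil => intro s; rfl
        | cons y ys ihy =>
          intro s
          simp only [PySem.List.enumerate_cons, List.map_cons, ihy (s + 1)]
      simpa using gen xs 0
    simp only [zero_add, Int.zero_mul, Int.add_zero]
    rw [h, List.foldl_map]
    apply PySem.List.foldl_congr_mem
    intro d p _
    have : c0 + step + p.1 * step = c0 + (p.1 + 1) * step := by ring
    rw [this]

-- the indexed fold with a constant cost forgets its indices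
theorem enum_const (fs : List String) (dict : PySem.Dict String Int) (b : Int) :
    (PySem.List.enumerate fs).foldl (fun d p => d.insert p.2 b) dict =
      fs.foldl (fun d name => d.insert name b) dict := by
  conv_rhs => rw [← PySem.List.map_snd_enumerate fs 0]
  rw [List.foldl_map]

theorem fc_equal (fs : List String) (b : Int) :
    generate_feature_costs fs "equal" b = generate_feature_costs_alt fs "equal" b := by
  simp only [generate_feature_costs, generate_feature_costs_alt, String.reduceEq, reduceIte, run_eq_enum]
  congr 1
  rw [← enum_const fs PySem.Dict.empty b]
  apply PySem.List.foldl_congr_mem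
  intro acc p _
  norm_num

theorem fc_inc (fs : List String) (b : Int) :
    generate_feature_costs fs "increasing" b = generate_feature_costs_alt fs "increasing" b := by
  simp only [generate_feature_costs, generate_feature_costs_alt, String.reduceEq, reduceIte, run_eq_enum]
  congr 1
  apply PySem.List.foldl_congr_mem
  intro d p _
  have : (p.1 + 1) * b = b + p.1 * b := by ring
  rw [this]

theorem fc_dec (fs : List String) (b : Int) :
    generate_feature_costs fs "decreasing" b = generate_feature_costs_alt fs "decreasing" b := by
  simp only [generate_feature_costs, generate_feature_costs_alt, String.reduceEq, reduceIte, run_eq_enum]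
  congr 1
  apply PySem.List.foldl_congr_mem
  intro d p _
  have : ((fs.length : Int) - p.1) * b = (fs.length : Int) * b + p.1 * (-b) := by ring
  rw [this]

-- ===== VERDICT (by name: the statement is the Claim_ definition above) =====
theorem generate_feature_costs_spec : Claim_equal_generate_feature_costs := by
  intro fs strat b _ hpre
  unfold Spec_generate_feature_costs
  rcases hpre with h | h | h <;> subst h
  · exact fc_equal fs b
  · exact fc_inc fs b
  · exact fc_dec fs b
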